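-- pv_equiv track=rewrite | github.com/Strafos/messenger-analysis | helpers.py | count_messages
-- ===== SOURCE A (Python) =====
-- from collections import defaultdict
--
-- def count_messages(messages):
--     counters = defaultdict(int)
--     participants = set()
--     for message in messages:
--         sender = message.get("sender_name", "")
--         participants.add(sender)
--         counters[sender] += 1
--     return sum(counters.values()) if len(participants) == 2 else 0
-- ===== SOURCE B (Python) =====
-- def count_messages(messages):
--     msgs = list(messages)
--     names = sorted(m.get("sender_name", "") for m in msgs)
--     if not names:
--         return 0
--     distinct = 1 + sum(1 for a, b in zip(names, names[1:]) if a != b)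
--     return len(msgs) if distinct == 2 else 0
-- ===== Notes on version B (the rewrite author's own statement) =====
-- stated objective: alternative
-- what changed: Replaces the hash-based counter/set accumulation by a sort-then-scan: sort the sender names, count distinct senders as 1 + the number of adjacent unequal pairs, and return the message count when that is exactly 2 (the sum of per-sender counts is just the total).
import Mathlib
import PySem

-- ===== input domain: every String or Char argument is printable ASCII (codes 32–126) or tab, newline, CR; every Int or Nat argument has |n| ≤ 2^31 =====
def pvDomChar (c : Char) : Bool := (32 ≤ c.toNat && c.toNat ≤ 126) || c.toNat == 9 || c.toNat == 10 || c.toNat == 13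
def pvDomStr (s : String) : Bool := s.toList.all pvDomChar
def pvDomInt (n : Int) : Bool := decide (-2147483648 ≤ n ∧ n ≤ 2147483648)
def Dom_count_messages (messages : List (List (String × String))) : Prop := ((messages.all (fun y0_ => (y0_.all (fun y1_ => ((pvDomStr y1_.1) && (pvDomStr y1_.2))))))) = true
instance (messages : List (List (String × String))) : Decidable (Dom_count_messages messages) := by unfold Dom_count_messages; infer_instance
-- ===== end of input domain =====

-- B replaces A's hash-based counter/set accumulation by sort-then-scan: sort the sender
-- names and count distinct senders as 1 + the number of adjacent unequal pairs
-- (objective: alternative algorithm of similar cost).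

-- ===== PORT A =====
def count_messages (messages : List (List (String × String))) : Int :=
  let st := messages.foldl
    (fun (st : PySem.Dict String Int × PySem.Set String) message =>
      let sender := (PySem.Dict.mk message).getD "sender_name" ""
      let participants := PySem.Set.add st.2 sender
      let counters := st.1.modify sender 0 (· + 1)
      (counters, participants))
    (PySem.Dict.empty, PySem.Set.empty)
  if PySem.Set.len st.2 = 2 then (PySem.Dict.values st.1).sum else 0

-- ===== PORT B =====
def count_messages_alt (messages : List (List (String × String))) : Int :=
  let names := PySem.List.sorted
    (messages.map (fun m => (PySem.Dict.mk m).getD "sender_name" "")) (fun x => x) false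
  match names with
  | [] => 0
  | _ :: _ =>
    -- sum(1 for a, b in zip(names, names[1:]) if a != b)
    let distinct : Int := 1 + ((names.zip (names.drop 1)).countP (fun p => p.1 ≠ p.2) : Nat)
    if distinct = 2 then (messages.length : Int) else 0

-- ===== PRECONDITION & SPEC =====
def Spec_count_messages (messages : List (List (String × String))) (out : Int) : Prop := out = count_messages_alt messages
instance (messages : List (List (String × String))) (out : Int) : Decidable (Spec_count_messages messages out) := by unfold Spec_count_messages; infer_instance

-- ===== CLAIM (what is proved, stated in full; the proofs are below) =====
def Claim_equal_count_messages : Prop := ∀ (messages : List (List (String × String))), Dom_count_messages messages → Spec_count_messages messages (count_messages messages)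

-- ===== LEMMAS AND PROOFS =====

-- The paired fold of A splits into the counter fold and the set fold over the sender list.
theorem count_messages_fold_split (messages : List (List (String × String)))
    (d : PySem.Dict String Int) (s : PySem.Set String) :
    messages.foldl
      (fun (st : PySem.Dict String Int × PySem.Set String) message =>
        let sender := (PySem.Dict.mk message).getD "sender_name" ""
        let participants := PySem.Set.add st.2 sender
        let counters := st.1.modify sender 0 (· + 1)
        (counters, participants))
      (d, s)
    = ((messages.map (fun m => (PySem.Dict.mk m).getD "sender_name" "")).foldl
         (fun d x => d.modify x 0 (· + 1)) d,
       (messages.map (fun m => (PySem.Dict.mk m).getD "sender_name" "")).foldl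
         PySem.Set.add s) := by
  induction messages generalizing d s with
  | nil => rfl
  | cons m rest ih => simpa using ih _ _

-- Summing Counter(xs).values() gives the length of xs.
theorem sum_counter_values (xs : List String) :
    (PySem.Dict.values (PySem.Dict.counter xs)).sum = (xs.length : Int) := by
  have hitems := PySem.Dict.items_counter (xs := xs)
  have hv : PySem.Dict.values (PySem.Dict.counter xs)
      = (PySem.Set.ofList xs).map (fun k => ((xs.count k : Nat) : Int)) := by
    simp [PySem.Dict.values, hitems, Function.comp]
  rw [hv]
  have hperm : (PySem.List.dedup xs).Perm xs.dedup := by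
    refine (List.perm_ext_iff_of_nodup (PySem.List.nodup_dedup xs) xs.nodup_dedup).2 ?_
    intro a; rw [PySem.List.mem_dedup, List.mem_dedup]
  have : ((PySem.Set.ofList xs).map (fun k => ((xs.count k : Nat) : Int))).sum
      = ((xs.dedup).map (fun k => ((xs.count k : Nat) : Int))).sum := by
    exact List.Perm.sum_eq (List.Perm.map _ (by simpa [PySem.List.dedup_eq_ofList] using hperm))
  rw [this]
  have := List.sum_map_count_dedup_eq_length xs
  have h2 : ((xs.dedup).map (fun k => ((xs.count k : Nat) : Int))).sum
      = (((xs.dedup).map (fun k => xs.count k)).sum : Int) := by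
    induction xs.dedup with
    | nil => simp
    | cons a t iht => push_cast [List.map_cons, List.sum_cons, iht]; ring
  rw [h2, this]

-- On a nonempty sorted list, 1 + the number of adjacent unequal pairs is the number of
-- distinct elements (duplicates of a sorted list are adjacent).
theorem adj_count_distinct (a : String) (t : List String)
    (h : (a :: t).Pairwise (· ≤ ·)) :
    1 + ((a :: t).zip t).countP (fun p => p.1 ≠ p.2) = (a :: t).dedup.length := by
  induction t generalizing a with
  | nil => simp
  | cons b t' ih =>
    have htail : (b :: t').Pairwise (· ≤ ·) := h.tail
    have hih := ih b htail
    by_cases hab : a = b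
    · subst hab
      simp only [List.zip_cons_cons, List.countP_cons]
      rw [List.dedup_cons_of_mem (List.mem_cons_self)]
      simpa using hih
    · have hnot : a ∉ b :: t' := by
        intro hmem
        rcases List.mem_cons.1 hmem with h1 | h1
        · exact hab h1
        · have hle : a ≤ b := (List.pairwise_cons.1 h).1 b (by simp)
          have hle2 : b ≤ a := (List.pairwise_cons.1 htail).1 a h1
          exact hab (le_antisymm hle hle2)
      simp only [List.zip_cons_cons, List.countP_cons]
      rw [List.dedup_cons_of_notMem hnot]
      simp only [List.length_cons]
      rw [← hih]
      simp [hab]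
      omega

-- dedup length is a permutation invariant, so it can be read off the sorted list.
theorem sorted_dedup_length (xs : List String) :
    (PySem.List.sorted xs (fun x => x) false).dedup.length = xs.dedup.length :=
  (List.Perm.dedup (PySem.List.sorted_perm xs (fun x => x) false)).length_eq

-- Set.len (ofList xs) = xs.dedup.length
theorem setlen_eq_dedup_length (xs : List String) :
    PySem.Set.len (PySem.Set.ofList xs) = (xs.dedup.length : Int) := by
  have hperm : (PySem.List.dedup xs).Perm xs.dedup := by
    refine (List.perm_ext_iff_of_nodup (PySem.List.nodup_dedup xs) xs.nodup_dedup).2 ?_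
    intro a; rw [PySem.List.mem_dedup, List.mem_dedup]
  have := hperm.length_eq
  simp [PySem.Set.len, ← PySem.List.dedup_eq_ofList, this]

-- ===== VERDICT (by name: the statement is the Claim_ definition above) =====
theorem count_messages_spec : Claim_equal_count_messages := by
  intro messages _
  unfold Spec_count_messages
  set xs := messages.map (fun m => (PySem.Dict.mk m).getD "sender_name" "") with hxs
  have hlen : xs.length = messages.length := by simp [hxs]
  have hA : count_messages messages
      = if (xs.dedup.length : Int) = 2 then (messages.length : Int) else 0 := by
    unfold count_messages
    rw [count_messages_fold_split]
    have hfold : List.foldl PySem.Set.add PySem.Set.empty xs = PySem.Set.ofList xs := rfl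
    simp only [← hxs, ← PySem.Dict.counter_eq_foldl, hfold,
      setlen_eq_dedup_length, sum_counter_values, hlen]
  have hB : count_messages_alt messages
      = if (xs.dedup.length : Int) = 2 then (messages.length : Int) else 0 := by
    unfold count_messages_alt
    simp only [← hxs]
    cases hsorted : PySem.List.sorted xs (fun x => x) false with
    | nil =>
      have hnil : xs = [] := (PySem.List.sorted_eq_nil_iff xs (fun x => x) false).1 hsorted
      simp [hnil]
    | cons a t =>
      have hpw : (a :: t).Pairwise (· ≤ ·) := by
        have := PySem.List.sorted_pairwise (xs := xs) (key := fun x => x)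
        rw [hsorted] at this; exact this
      have hd : (a :: t).dedup.length = xs.dedup.length := by
        rw [← hsorted]; exact sorted_dedup_length xs
      have key : (1 : Int) + (((a :: t).zip ((a :: t).drop 1)).countP (fun p => p.1 ≠ p.2) : Nat)
          = (xs.dedup.length : Int) := by
        exact_mod_cast (adj_count_distinct a t hpw).trans hd
      simp only [List.drop_succ_cons, List.drop_zero] at key ⊢
      simp only [key]
  rw [hA, hB]
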